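-- pv_equiv track=rewrite | github.com/Amaruchan/STEPW1HM | homework2.py | count_to_words_rec
-- ===== SOURCE A (Python) =====
-- def count_to_words_rec(alph_count_tuple):
--   lst = []
--   chr = alph_count_tuple[0][0]
--   length = alph_count_tuple[0][1] + 1
--   s = ""
--   if len(alph_count_tuple)==1:
--     pre_lst = [""]
--   else:
--     pre_lst = count_to_words_rec(alph_count_tuple[1:])
--   for _ in range(length):
--     lst += [s+pre_s for pre_s in pre_lst]
--     s += chr
--   return lst
-- ===== SOURCE B (Python) =====
-- def count_to_words_rec(alph_count_tuple):
--     result = [""]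
--     for c, n in reversed(alph_count_tuple):
--         result = [c * i + r for i in range(n + 1) for r in result]
--     return result
-- ===== Notes on version B (the rewrite author's own statement) =====
-- stated objective: idiomatic
-- what changed: Replaced the recursion over the tuple (with a per-level accumulator string grown by repeated '+=') by a single iterative right-to-left fold that extends the result with a Cartesian-product comprehension using string repetition c*i.
import Mathlib
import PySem

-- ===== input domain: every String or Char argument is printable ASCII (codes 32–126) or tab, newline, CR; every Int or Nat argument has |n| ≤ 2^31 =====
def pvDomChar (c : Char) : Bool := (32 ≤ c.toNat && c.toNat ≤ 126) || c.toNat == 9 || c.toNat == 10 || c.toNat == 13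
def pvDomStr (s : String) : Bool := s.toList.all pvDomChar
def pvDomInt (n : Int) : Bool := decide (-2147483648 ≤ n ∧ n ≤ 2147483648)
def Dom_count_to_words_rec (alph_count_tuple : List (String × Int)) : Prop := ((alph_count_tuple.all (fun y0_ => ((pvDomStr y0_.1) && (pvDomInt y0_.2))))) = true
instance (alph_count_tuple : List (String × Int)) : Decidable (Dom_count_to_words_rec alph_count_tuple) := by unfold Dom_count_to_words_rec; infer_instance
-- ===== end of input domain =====

-- B replaces A's recursion over the tuple by per-pair pools of repeated strings
-- combined with one iterative Cartesian-product fold (idiomatic; same cost).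


-- ===== PORT A =====
-- A: lst = []; chr = t[0][0]; length = t[0][1] + 1; s = "";
--    pre_lst = [""] if len(t)==1 else rec(t[1:]);
--    for _ in range(length): lst += [s+p for p in pre_lst]; s += chr;  return lst
-- (the [] case raises IndexError in Python; excluded by Pre_ below)
def count_to_words_rec : List (String × Int) → List String
  | [] => []
  | (chr, cnt) :: rest =>
    let length : Int := cnt + 1
    let pre_lst : List String := if rest.isEmpty then [""] else count_to_words_rec rest
    ((PySem.List.pyRange 0 length 1).foldl
      (fun (acc : List String × String) _ =>
        (acc.1 ++ pre_lst.map (fun pre_s => acc.2 ++ pre_s), acc.2 ++ chr))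
      ([], "")).1

-- ===== PORT B =====
-- hand port of Python's string repetition c * i (exact: "" for i ≤ 0, i copies otherwise)
def pyStrMulNat (c : String) : Nat → String
  | 0 => ""
  | n + 1 => c ++ pyStrMulNat c n

def pyStrMul (c : String) (i : Int) : String := pyStrMulNat c i.toNat

-- B: result = [""];
--    for c, n in reversed(t): result = [c*i + r for i in range(n+1) for r in result];
--    return result
def count_to_words_rec_alt (alph_count_tuple : List (String × Int)) : List String :=
  alph_count_tuple.reverse.foldl
    (fun result cn =>
      (PySem.List.pyRange 0 (cn.2 + 1) 1).flatMap
        (fun i => result.map (fun r => pyStrMul cn.1 i ++ r)))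
    [""]

-- ===== PRECONDITION & SPEC =====
-- Pre_ excludes only the empty list, on which Python A raises IndexError (alph_count_tuple[0]).
def Pre_count_to_words_rec (alph_count_tuple : List (String × Int)) : Prop :=
  alph_count_tuple ≠ []
instance (alph_count_tuple : List (String × Int)) : Decidable (Pre_count_to_words_rec alph_count_tuple) := by unfold Pre_count_to_words_rec; infer_instance

def pvWitness_count_to_words_rec : (List (String × Int)) := [("a", 1), ("b", 2)]

def Spec_count_to_words_rec (alph_count_tuple : List (String × Int)) (out : List String) : Prop := out = count_to_words_rec_alt alph_count_tuple
instance (alph_count_tuple : List (String × Int)) (out : List String) : Decidable (Spec_count_to_words_rec alph_count_tuple out) := by unfold Spec_count_to_words_rec; infer_instance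

-- ===== CLAIM (what is proved, stated in full; the proofs are below) =====
def Claim_equal_count_to_words_rec : Prop := ∀ (alph_count_tuple : List (String × Int)), Dom_count_to_words_rec alph_count_tuple → Pre_count_to_words_rec alph_count_tuple → Spec_count_to_words_rec alph_count_tuple (count_to_words_rec alph_count_tuple)

-- ===== LEMMAS AND PROOFS =====

-- A's for-loop: after iterating over any list (elements ignored), lst holds, for each
-- iteration index i, pre_lst prefixed with s ++ chr*i.
theorem loopA {α : Type} (l : List α) (pre : List String) (c : String) :
    ∀ (lst : List String) (s : String),
    (l.foldl (fun (acc : List String × String) _ =>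
        (acc.1 ++ pre.map (fun p => acc.2 ++ p), acc.2 ++ c)) (lst, s)).1
      = lst ++ (List.range l.length).flatMap
          (fun i => pre.map (fun p => s ++ (pyStrMulNat c i ++ p))) := by
  induction l with
  | nil => intro lst s; simp
  | cons a l ih =>
    intro lst s
    simp only [List.foldl_cons, ih, List.length_cons, List.range_succ_eq_map,
      List.flatMap_cons, List.flatMap_map, pyStrMulNat]
    simp only [List.append_assoc]
    simp [String.append_assoc]

-- B's loop over the reversed list peels the FIRST pair off as the outermost product factor.
theorem alt_cons (c : String) (n : Int) (rest : List (String × Int)) :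
    count_to_words_rec_alt ((c, n) :: rest)
      = (PySem.List.pyRange 0 (n + 1) 1).flatMap
          (fun i => (count_to_words_rec_alt rest).map (fun r => pyStrMul c i ++ r)) := by
  simp only [count_to_words_rec_alt, List.reverse_cons, List.foldl_append, List.foldl_cons,
    List.foldl_nil]

theorem pool_eq (c : String) (n : Int) (X : List String) :
    (PySem.List.pyRange 0 (n + 1) 1).flatMap (fun i => X.map (fun r => pyStrMul c i ++ r))
      = (List.range (n + 1).toNat).flatMap (fun k => X.map (fun r => pyStrMulNat c k ++ r)) := by
  rw [PySem.List.pyRange_one]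
  simp [List.flatMap_map, pyStrMul]

theorem A_eq_alt : ∀ (t : List (String × Int)), t ≠ [] →
    count_to_words_rec t = count_to_words_rec_alt t := by
  intro t
  induction t with
  | nil => intro h; exact absurd rfl h
  | cons hd rest ih =>
    intro _
    obtain ⟨c, n⟩ := hd
    have hpre : (if rest.isEmpty then [""] else count_to_words_rec rest)
        = count_to_words_rec_alt rest := by
      cases rest with
      | nil => simp [count_to_words_rec_alt]
      | cons r rs => simpa using ih (by simp)
    rw [alt_cons, pool_eq]
    show ((PySem.List.pyRange 0 (n + 1) 1).foldl _ ([], "")).1 = _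
    rw [loopA, hpre, PySem.List.length_pyRange_one]
    simp

-- ===== VERDICT (by name: the statement is the Claim_ definition above) =====
theorem count_to_words_rec_spec : Claim_equal_count_to_words_rec := by
  intro t _ hpre
  unfold Spec_count_to_words_rec
  exact A_eq_alt t hpre
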